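-- pv_equiv track=rewrite | github.com/zhipengli0524/perminusminus | trunk/ perminusminus/dat/c_dat.py | gen_children
-- ===== SOURCE A (Python) =====
-- def gen_children(lex,start,prefix):
--     children=set()
--     l=len(prefix)
--     for ind in range(start,len(lex)):
--         word=lex[ind]
--         if len(word)<l:break
--         if not all(a==b for a,b in zip(word,prefix)):
--             break
--         if len(word)>l:
--             children.add(word[l])
--     children=sorted(list(children))
--     return children
-- ===== SOURCE B (Python) =====
-- def gen_children(lex, start, prefix):
--     # Divide-and-conquer over the index range with an early-cutoff flag, then
--     # sort the collected (duplicate-bearing) next chars and drop adjacent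
--     # duplicates -- no hash set.
--     l = len(prefix)
--     n = len(lex)
--
--     def rec(i, j):
--         # next-char occurrences in lex[i:j] up to the first non-matching word;
--         # second component: whether every word in lex[i:j] matched.
--         if j - i <= 0:
--             return [], True
--         if j - i == 1:
--             word = lex[i]
--             if word[:l] != prefix:
--                 return [], False
--             return ([word[l]] if len(word) > l else []), True
--         mid = (i + j) // 2
--         chars, full = rec(i, mid)
--         if not full:
--             return chars, False
--         chars2, full2 = rec(mid, j)
--         return chars + chars2, full2
--
--     out = []
--     for c in sorted(rec(start, n)[0]):
--         if not out or out[-1] != c: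
--             out.append(c)
--     return out
-- ===== Notes on version B (the rewrite author's own statement) =====
-- stated objective: alternative
-- what changed: B replaces A's single left-to-right loop with a hash set and final sort by a divide-and-conquer recursion over the index range that carries a 'fully matched' cutoff flag (comparing word[:l] slices instead of per-char zip), collects the next chars WITH duplicates, sorts them, and removes adjacent duplicates in a final pass instead of using a set.
import Mathlib
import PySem

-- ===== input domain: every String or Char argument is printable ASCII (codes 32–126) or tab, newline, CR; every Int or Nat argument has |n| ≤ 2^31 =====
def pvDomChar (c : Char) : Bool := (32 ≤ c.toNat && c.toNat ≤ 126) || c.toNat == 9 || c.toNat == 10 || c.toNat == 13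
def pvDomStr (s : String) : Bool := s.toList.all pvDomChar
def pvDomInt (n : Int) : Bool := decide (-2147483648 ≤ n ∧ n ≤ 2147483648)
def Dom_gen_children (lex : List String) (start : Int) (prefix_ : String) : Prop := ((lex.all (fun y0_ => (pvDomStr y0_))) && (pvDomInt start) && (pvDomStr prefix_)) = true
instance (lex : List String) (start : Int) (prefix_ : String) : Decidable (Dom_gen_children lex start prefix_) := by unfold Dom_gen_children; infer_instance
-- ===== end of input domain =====

-- B replaces A's linear loop + hash set + sort by a divide-and-conquer recursion with a cutoff flag,
-- collecting next chars with duplicates, then sort + adjacent-duplicate removal (same return value).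

-- ===== PORT A =====
-- the for-loop with break: recursion over the index list, carrying the set
def genChildrenLoopA (lex : List String) (pre : String) : List Int → PySem.Set String → PySem.Set String
  | [], children => children
  | ind :: rest, children =>
    match PySem.List.pyGet? lex ind with
    | none => children        -- lex[ind] raises IndexError in Python; Pre_ excludes these inputs
    | some word =>
      if word.toList.length < pre.toList.length then children
      else if !((word.toList.zip pre.toList).all fun ab => ab.1 == ab.2) then children
      else
        genChildrenLoopA lex pre rest
          (if word.toList.length > pre.toList.length then
            match PySem.Str.pyGet? word (pre.toList.length : Int) with
            | some c => PySem.Set.add children (String.ofList [c])   -- word[l] is a 1-char string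
            | none => children
          else children)

def gen_children (lex : List String) (start : Int) (prefix_ : String) : List String :=
  PySem.List.sorted
    (genChildrenLoopA lex prefix_ (PySem.List.pyRange start (lex.length : Int) 1) PySem.Set.empty)
    (fun x => x) false

-- ===== PORT B =====
-- termination measure facts for the midpoint split (cited by name in genRecB's decreasing_by)
theorem pvMidDec1 (i j : Int) (h1 : ¬ j - i ≤ 0) (h2 : ¬ j - i = 1) :
    (PySem.Int.floordiv (i + j) 2 - i).toNat < (j - i).toNat := by
  have hf : PySem.Int.floordiv (i + j) 2 = (i + j) / 2 := by
    show Int.fdiv (i + j) 2 = (i + j) / 2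
    rw [Int.fdiv_eq_ediv]; simp
  have hlt : (i + j) / 2 < j := by
    rw [Int.ediv_lt_iff_lt_mul two_pos]; omega
  have hge : i ≤ (i + j) / 2 := by
    rw [Int.le_ediv_iff_mul_le two_pos]; omega
  rw [hf]
  have hsub : (i + j) / 2 - i < j - i := sub_lt_sub_right hlt i
  have h0 : 0 ≤ (i + j) / 2 - i := sub_nonneg.mpr hge
  exact (Int.toNat_lt_toNat (lt_of_le_of_lt h0 hsub)).mpr hsub

theorem pvMidDec2 (i j : Int) (h1 : ¬ j - i ≤ 0) (h2 : ¬ j - i = 1) :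
    (j - PySem.Int.floordiv (i + j) 2).toNat < (j - i).toNat := by
  have hf : PySem.Int.floordiv (i + j) 2 = (i + j) / 2 := by
    show Int.fdiv (i + j) 2 = (i + j) / 2
    rw [Int.fdiv_eq_ediv]; simp
  have hgt : i + 1 ≤ (i + j) / 2 := by
    rw [Int.le_ediv_iff_mul_le two_pos]; omega
  have hle : (i + j) / 2 ≤ j := by
    have hlt : (i + j) / 2 < j := by
      rw [Int.ediv_lt_iff_lt_mul two_pos]; omega
    exact hlt.le
  rw [hf]
  have hsub : j - (i + j) / 2 < j - i := sub_lt_sub_left (Int.lt_iff_add_one_le.mpr hgt) j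
  have h0 : 0 ≤ j - (i + j) / 2 := sub_nonneg.mpr hle
  exact (Int.toNat_lt_toNat (lt_of_le_of_lt h0 hsub)).mpr hsub

-- rec(i, j): divide and conquer over the index range; second component = "every word in lex[i:j] matched"
def genRecB (lex : List String) (pre : String) (i j : Int) : List String × Bool :=
  if _h1 : j - i ≤ 0 then ([], true)
  else if _h2 : j - i = 1 then
    match PySem.List.pyGet? lex i with
    | none => ([], false)   -- lex[i] raises IndexError in Python; Pre_ excludes these inputs
    | some word =>
      if PySem.Str.slice word none (some (pre.toList.length : Int)) ≠ pre then ([], false)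
      else
        ((if word.toList.length > pre.toList.length then
            match PySem.Str.pyGet? word (pre.toList.length : Int) with
            | some c => [String.ofList [c]]
            | none => []
          else []), true)
  else
    let mid := PySem.Int.floordiv (i + j) 2
    let lr := genRecB lex pre i mid
    if !lr.2 then (lr.1, false)
    else
      let rr := genRecB lex pre mid j
      (lr.1 ++ rr.1, rr.2)
termination_by (j - i).toNat
decreasing_by
  · exact pvMidDec1 i j _h1 _h2
  · exact pvMidDec2 i j _h1 _h2

-- the final for-loop: append c unless it repeats the last appended char
def dedupeStep (out : List String) (c : String) : List String :=
  if out = [] ∨ PySem.List.pyGet? out (-1) ≠ some c then out ++ [c] else out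

def gen_children_alt (lex : List String) (start : Int) (prefix_ : String) : List String :=
  (PySem.List.sorted (genRecB lex prefix_ start (lex.length : Int)).1 (fun x => x) false).foldl
    dedupeStep []

-- ===== PRECONDITION & SPEC =====
-- Pre_ excludes start < -len(lex), where Python's lex[start] raises IndexError in both A and B.
def Pre_gen_children (lex : List String) (start : Int) (prefix_ : String) : Prop :=
  -(lex.length : Int) ≤ start
instance (lex : List String) (start : Int) (prefix_ : String) : Decidable (Pre_gen_children lex start prefix_) := by unfold Pre_gen_children; infer_instance

def pvWitness_gen_children : List String × Int × String := (["ab", "ac", "b"], 0, "a")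

def Spec_gen_children (lex : List String) (start : Int) (prefix_ : String) (out : List String) : Prop := out = gen_children_alt lex start prefix_
instance (lex : List String) (start : Int) (prefix_ : String) (out : List String) : Decidable (Spec_gen_children lex start prefix_ out) := by unfold Spec_gen_children; infer_instance

-- ===== CLAIM (what is proved, stated in full; the proofs are below) =====
def Claim_equal_gen_children : Prop := ∀ (lex : List String) (start : Int) (prefix_ : String), Dom_gen_children lex start prefix_ → Pre_gen_children lex start prefix_ → Spec_gen_children lex start prefix_ (gen_children lex start prefix_)

-- ===== LEMMAS AND PROOFS =====

-- linear reference recursion: the same value as B's divide-and-conquer, index by index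
def linB (lex : List String) (pre : String) (j i : Int) : List String × Bool :=
  if _h : i < j then
    match PySem.List.pyGet? lex i with
    | none => ([], false)
    | some word =>
      if PySem.Str.slice word none (some (pre.toList.length : Int)) ≠ pre then ([], false)
      else
        let r := linB lex pre j (i + 1)
        ((if word.toList.length > pre.toList.length then
            match PySem.Str.pyGet? word (pre.toList.length : Int) with
            | some c => [String.ofList [c]]
            | none => []
          else []) ++ r.1, r.2)
  else ([], true)
termination_by (j - i).toNat
decreasing_by omega

theorem lin_split (lex : List String) (pre : String) (i mid j : Int)
    (h1 : i ≤ mid) (h2 : mid ≤ j) :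
    linB lex pre j i =
      (if (linB lex pre mid i).2 then
        ((linB lex pre mid i).1 ++ (linB lex pre j mid).1, (linB lex pre j mid).2)
      else linB lex pre mid i) := by
  by_cases h : i < mid
  · rw [linB.eq_def lex pre j i, dif_pos (show i < j by omega), linB.eq_def lex pre mid i, dif_pos h]
    cases hw : PySem.List.pyGet? lex i with
    | none => simp
    | some word =>
      dsimp only
      by_cases hc : PySem.Str.slice word none (some (pre.toList.length : Int)) ≠ pre
      · simp only [if_pos hc]; simp
      · simp only [if_neg hc]
        have ih := lin_split lex pre (i + 1) mid j (by omega) h2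
        rw [ih]
        by_cases hb : (linB lex pre mid (i + 1)).2
        · simp [hb, List.append_assoc]
        · simp [hb]
  · have : i = mid := by omega
    subst this
    rw [show linB lex pre i i = ([], true) by rw [linB.eq_def]; simp]
    simp
termination_by (mid - i).toNat
decreasing_by omega

theorem rec_eq_lin (lex : List String) (pre : String) (i j : Int) :
    genRecB lex pre i j = linB lex pre j i := by
  rw [genRecB.eq_def]
  by_cases h1 : j - i ≤ 0
  · rw [dif_pos h1, linB.eq_def, dif_neg (show ¬ i < j by omega)]
  · rw [dif_neg h1]
    by_cases h2 : j - i = 1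
    · rw [dif_pos h2, linB.eq_def lex pre j i, dif_pos (show i < j by omega)]
      cases hw : PySem.List.pyGet? lex i with
      | none => rfl
      | some word =>
        dsimp only
        by_cases hc : PySem.Str.slice word none (some (pre.toList.length : Int)) ≠ pre
        · simp only [if_pos hc]
        · simp only [if_neg hc]
          rw [show linB lex pre j (i + 1) = ([], true) by rw [linB.eq_def]; rw [dif_neg (show ¬ i + 1 < j by omega)]]
          simp
    · rw [dif_neg h2]
      have hmid : PySem.Int.floordiv (i + j) 2 = (i + j) / 2 := by
        show Int.fdiv (i + j) 2 = (i + j) / 2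
        rw [Int.fdiv_eq_ediv]; simp
      have hb1 : i ≤ (i + j) / 2 := by omega
      have hb2 : (i + j) / 2 ≤ j := by omega
      rw [hmid]
      show (if (!(genRecB lex pre i ((i + j) / 2)).2) = true then ((genRecB lex pre i ((i + j) / 2)).1, false)
        else ((genRecB lex pre i ((i + j) / 2)).1 ++ (genRecB lex pre ((i + j) / 2) j).1,
          (genRecB lex pre ((i + j) / 2) j).2)) = linB lex pre j i
      rw [rec_eq_lin lex pre i ((i + j) / 2), rec_eq_lin lex pre ((i + j) / 2) j]
      rw [lin_split lex pre i ((i + j) / 2) j hb1 hb2]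
      by_cases hb : (linB lex pre ((i + j) / 2) i).2
      · simp [hb]
      · simp only [if_pos (show (!(linB lex pre ((i + j) / 2) i).2) = true by simp [hb]),
          if_neg hb]
        exact Prod.ext rfl (by simp [Bool.not_eq_true] at hb ⊢; exact hb)
termination_by (j - i).toNat
decreasing_by
  all_goals
    have hf : Int.fdiv (i + j) 2 = (i + j) / 2 := by
      rw [Int.fdiv_eq_ediv]; simp
    simp only [PySem.Int.floordiv] at *
    omega

-- A's continue condition (length test + char-wise zip) is exactly "word[:l] == prefix"
theorem take_eq_iff (w p : List Char) :
    w.take p.length = p ↔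
      (¬ w.length < p.length ∧ ((w.zip p).all fun ab => ab.1 == ab.2) = true) := by
  induction p generalizing w with
  | nil => simp
  | cons a p ih =>
    cases w with
    | nil => simp
    | cons b w =>
      simp only [List.length_cons, List.take_succ_cons, List.cons_eq_cons,
        List.zip_cons_cons, List.all_cons, Bool.and_eq_true, beq_iff_eq,
        Nat.add_lt_add_iff_right]
      rw [ih w]
      tauto

theorem cond_equiv (w p : String) :
    (PySem.Str.slice w none (some (p.toList.length : Int)) = p) ↔
      (¬ w.toList.length < p.toList.length ∧
        ((w.toList.zip p.toList).all fun ab => ab.1 == ab.2) = true) := by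
  rw [← take_eq_iff]
  constructor
  · intro h
    have h2 := congrArg String.toList h
    simpa [PySem.Str.slice, PySem.Chars.slice, PySem.List.slice_to_natCast] using h2
  · intro h
    have h2 : String.ofList (w.toList.take p.toList.length) = String.ofList p.toList :=
      congrArg _ h
    simpa [PySem.Str.slice, PySem.Chars.slice, PySem.List.slice_to_natCast] using h2

theorem loopA_mem (lex : List String) (pre : String) (i : Int) (s : List String) (hs : s.Nodup) :
    (genChildrenLoopA lex pre (PySem.List.pyRange i (lex.length : Int) 1) s).Nodup ∧
    ∀ x, x ∈ genChildrenLoopA lex pre (PySem.List.pyRange i (lex.length : Int) 1) s ↔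
      x ∈ s ∨ x ∈ (linB lex pre (lex.length : Int) i).1 := by
  by_cases hin : i < (lex.length : Int)
  · rw [PySem.List.pyRange_one_cons hin, linB.eq_def lex pre (lex.length : Int) i, dif_pos hin]
    cases hw : PySem.List.pyGet? lex i with
    | none => simp [genChildrenLoopA, hw, hs]
    | some word =>
      dsimp only
      simp only [genChildrenLoopA, hw]
      by_cases hc : PySem.Str.slice word none (some (pre.toList.length : Int)) = pre
      · have hcc := (cond_equiv word pre).1 hc
        rw [if_neg hcc.1]
        rw [if_neg (show ¬(!((word.toList.zip pre.toList).all fun ab => ab.1 == ab.2)) = true by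
          simp [hcc.2])]
        rw [if_neg (show ¬(PySem.Str.slice word none (some (pre.toList.length : Int)) ≠ pre) from
          fun hh => hh hc)]
        by_cases hlen : word.toList.length > pre.toList.length
        · rw [if_pos hlen]
          cases hg : PySem.Str.pyGet? word (pre.toList.length : Int) with
          | none =>
            obtain ⟨hnd, hm⟩ := loopA_mem lex pre (i + 1) s hs
            exact ⟨hnd, fun x => by rw [hm x]; simp⟩
          | some c =>
            obtain ⟨hnd, hm⟩ := loopA_mem lex pre (i + 1)
              (PySem.Set.add s (String.ofList [c])) (PySem.Set.nodup_add s _ hs)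
            refine ⟨hnd, fun x => ?_⟩
            rw [hm x, PySem.Set.mem_add]
            simp only [if_pos hlen, List.cons_append, List.nil_append, List.mem_cons,
              List.mem_append, List.mem_singleton]
            tauto
        · rw [if_neg hlen]
          obtain ⟨hnd, hm⟩ := loopA_mem lex pre (i + 1) s hs
          refine ⟨hnd, fun x => ?_⟩
          rw [hm x]
          have hlen' : ¬ pre.length < word.length := by simpa using hlen
          simp [hlen']
      · -- the word does not match: A breaks at the length test or the zip test
        rw [if_pos (show PySem.Str.slice word none (some (pre.toList.length : Int)) ≠ pre from hc)]
        have hnc := (not_and_or.1 (fun hh => hc ((cond_equiv word pre).2 hh)))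
        by_cases hl : word.toList.length < pre.toList.length
        · rw [if_pos hl]; exact ⟨hs, fun x => by simp⟩
        · have hzip : (!(word.toList.zip pre.toList).all fun ab => ab.1 == ab.2) = true := by
            rcases hnc with h | h
            · exact absurd hl h
            · simp only [Bool.not_eq_true] at h; simp [h]
          rw [if_neg hl, if_pos hzip]
          exact ⟨hs, fun x => by simp⟩
  · rw [linB.eq_def, dif_neg hin]
    rw [PySem.List.pyRange_one, show ((lex.length : Int) - i).toNat = 0 by omega]
    simp [genChildrenLoopA, hs]
termination_by ((lex.length : Int) - i).toNat
decreasing_by all_goals omega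

theorem pyGet_neg_one (out : List String) : PySem.List.pyGet? out (-1) = out.getLast? := by
  cases out with
  | nil => simp [PySem.List.pyGet?, PySem.List.pyIdx?]
  | cons a t => simp [PySem.List.pyGet?, PySem.List.pyIdx?, List.getLast?_eq_getElem?]

theorem last_of_max (out : List String) (c : String) (hp : out.Pairwise (· < ·))
    (hm : c ∈ out) (hb : ∀ z ∈ out, z ≤ c) : out.getLast? = some c := by
  induction out with
  | nil => cases hm
  | cons a t ih =>
    cases t with
    | nil =>
      simp only [List.mem_singleton] at hm
      simp [hm]
    | cons b t' =>
      rw [List.getLast?_cons_cons]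
      rcases List.mem_cons.1 hm with hac | hm'
      · exfalso
        have hab : a < b := (List.pairwise_cons.1 hp).1 b (by simp)
        have hba : b ≤ a := hac ▸ hb b (by simp)
        exact absurd hab (not_lt.2 hba)
      · exact ih (List.pairwise_cons.1 hp).2 hm' (fun z hz => hb z (List.mem_cons_of_mem _ hz))

theorem dedupe_fold (L : List String) (out : List String)
    (hL : L.Pairwise (· ≤ ·)) (ho : out.Pairwise (· < ·))
    (hbd : ∀ y ∈ out, ∀ c ∈ L, y ≤ c) :
    (L.foldl dedupeStep out).Pairwise (· < ·) ∧
    ∀ x, x ∈ L.foldl dedupeStep out ↔ x ∈ out ∨ x ∈ L := by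
  induction L generalizing out with
  | nil => exact ⟨ho, fun x => by simp⟩
  | cons c L' ih =>
    have hL' := (List.pairwise_cons.1 hL).2
    have hcL' := (List.pairwise_cons.1 hL).1
    simp only [List.foldl_cons]
    by_cases hcm : c ∈ out
    · have hlast : out.getLast? = some c :=
        last_of_max out c ho hcm (fun z hz => hbd z hz c (by simp))
      have hstep : dedupeStep out c = out := by
        unfold dedupeStep
        rw [if_neg]
        push_neg
        refine ⟨fun h => by simp [h] at hcm, ?_⟩
        rw [pyGet_neg_one, hlast]
      rw [hstep]
      obtain ⟨h1, h2⟩ := ih out hL' ho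
        (fun y hy d hd => le_trans (hbd y hy c (by simp)) (hcL' d hd))
      refine ⟨h1, fun x => ?_⟩
      rw [h2 x]
      constructor
      · rintro (h | h)
        · exact Or.inl h
        · exact Or.inr (List.mem_cons_of_mem _ h)
      · rintro (h | h)
        · exact Or.inl h
        · rcases List.mem_cons.1 h with rfl | h'
          · exact Or.inl hcm
          · exact Or.inr h'
    · have hstep : dedupeStep out c = out ++ [c] := by
        unfold dedupeStep
        cases hlast : out.getLast? with
        | none => rw [if_pos (Or.inl (by simpa using hlast))]
        | some y =>
          have hy : y ∈ out := List.mem_of_getLast? hlast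
          rw [if_pos (Or.inr (by rw [pyGet_neg_one, hlast]; intro h; exact hcm (by simpa [← Option.some_inj.1 h] using hy)))]
      rw [hstep]
      have hlt : ∀ y ∈ out, y < c := fun y hy =>
        lt_of_le_of_ne (hbd y hy c (by simp)) (fun h => hcm (h ▸ hy))
      have ho' : (out ++ [c]).Pairwise (· < ·) := by
        rw [List.pairwise_append]
        exact ⟨ho, List.pairwise_singleton _ _, fun y hy z hz => by
          rw [List.mem_singleton.1 hz]; exact hlt y hy⟩
      obtain ⟨h1, h2⟩ := ih (out ++ [c]) hL' ho' (by
        intro y hy d hd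
        rcases List.mem_append.1 hy with h | h
        · exact le_trans (hbd y h c (by simp)) (hcL' d hd)
        · rw [List.mem_singleton.1 h]; exact hcL' d hd)
      refine ⟨h1, fun x => ?_⟩
      rw [h2 x]
      simp only [List.mem_append, List.mem_singleton, List.mem_cons]
      tauto

-- ===== VERDICT (by name: the statement is the Claim_ definition above) =====
theorem gen_children_spec : Claim_equal_gen_children := by
  intro lex start prefix_ _hdom _hpre
  unfold Spec_gen_children gen_children gen_children_alt
  rw [rec_eq_lin]
  obtain ⟨hnd, hmem⟩ := loopA_mem lex prefix_ start PySem.Set.empty (by simp [PySem.Set.empty])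
  have hL : (PySem.List.sorted (linB lex prefix_ (lex.length : Int) start).1
      (fun x => x) false).Pairwise (· ≤ ·) := by
    have := PySem.List.sorted_pairwise (linB lex prefix_ (lex.length : Int) start).1 (fun x => x)
    simpa using this
  obtain ⟨hpw, hm⟩ := dedupe_fold _ [] hL (by simp) (by simp)
  apply PySem.List.sorted_eq_of_perm_of_pairwise_lt
  · rw [List.perm_ext_iff_of_nodup (hpw.imp (fun h => ne_of_lt h)) hnd]
    intro x
    rw [hm x, hmem x, PySem.List.mem_sorted]
    simp [PySem.Set.empty]
  · exact hpw
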